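-- pv_equiv track=rewrite | github.com/yifan1207/PT-IT-Model-Differences | src/poc/exp2/plots/plot10_cosine_similarity.py | _split_into_thirds
-- ===== SOURCE A (Python) =====
-- def _split_into_thirds(steps: list) -> list[list]:
--     """Split a list of per-step values into prompt-relative early/mid/late thirds."""
--     n = len(steps)
--     if n == 0:
--         return [[], [], []]
--     bands: list[list] = [[], [], []]
--     for idx, val in enumerate(steps):
--         band = min((idx * 3) // n, 2)
--         bands[band].append(val)
--     return bands
-- ===== SOURCE B (Python) =====
-- def _split_into_thirds(steps: list) -> list[list]:
--     """Split a list of per-step values into prompt-relative early/mid/late thirds."""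
--     n = len(steps)
--     k1 = (n + 2) // 3
--     k2 = (2 * n + 2) // 3
--     return [steps[:k1], steps[k1:k2], steps[k2:]]
-- ===== Notes on version B (the rewrite author's own statement) =====
-- stated objective: idiomatic
-- what changed: B computes the two band boundaries ceil(n/3) and ceil(2n/3) in closed form and returns three list slices, instead of classifying each element with a per-index band computation and appending into buckets.
import Mathlib
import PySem

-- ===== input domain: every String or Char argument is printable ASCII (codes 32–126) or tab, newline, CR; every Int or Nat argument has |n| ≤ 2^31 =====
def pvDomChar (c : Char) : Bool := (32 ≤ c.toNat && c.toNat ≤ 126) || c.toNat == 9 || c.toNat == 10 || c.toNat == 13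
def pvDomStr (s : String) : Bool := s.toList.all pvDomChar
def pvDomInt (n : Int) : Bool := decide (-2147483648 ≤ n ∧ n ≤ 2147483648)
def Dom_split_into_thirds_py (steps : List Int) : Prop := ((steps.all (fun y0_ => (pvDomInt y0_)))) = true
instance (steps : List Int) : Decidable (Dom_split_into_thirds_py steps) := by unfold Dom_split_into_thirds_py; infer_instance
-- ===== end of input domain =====

-- B replaces the per-element band classification loop by two closed-form cut points and three slices (objective: idiomatic).

-- ===== PORT A =====
-- the loop body: band = min((idx*3)//n, 2); bands[band].append(val), with bands as a triple
def pvBandStep (n : Int) (b : List Int × List Int × List Int) (p : Int × Int) :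
    List Int × List Int × List Int :=
  let band := min (PySem.Int.floordiv (p.1 * 3) n) 2
  if band = 0 then (b.1 ++ [p.2], b.2.1, b.2.2)
  else if band = 1 then (b.1, b.2.1 ++ [p.2], b.2.2)
  else (b.1, b.2.1, b.2.2 ++ [p.2])

def split_into_thirds_py (steps : List Int) : List (List Int) :=
  let n : Int := steps.length
  if n = 0 then [[], [], []]
  else
    let bands := (PySem.List.enumerate steps 0).foldl (pvBandStep n) ([], [], [])
    [bands.1, bands.2.1, bands.2.2]

-- ===== PORT B =====
def split_into_thirds_py_alt (steps : List Int) : List (List Int) :=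
  let n : Int := steps.length
  let k1 := PySem.Int.floordiv (n + 2) 3
  let k2 := PySem.Int.floordiv (2 * n + 2) 3
  [PySem.List.slice steps none (some k1),
   PySem.List.slice steps (some k1) (some k2),
   PySem.List.slice steps (some k2) none]

-- ===== PRECONDITION & SPEC =====
def Spec_split_into_thirds_py (steps : List Int) (out : List (List Int)) : Prop := out = split_into_thirds_py_alt steps
instance (steps : List Int) (out : List (List Int)) : Decidable (Spec_split_into_thirds_py steps out) := by unfold Spec_split_into_thirds_py; infer_instance

-- ===== CLAIM (what is proved, stated in full; the proofs are below) =====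
def Claim_equal_split_into_thirds_py : Prop := ∀ (steps : List Int), Dom_split_into_thirds_py steps → Spec_split_into_thirds_py steps (split_into_thirds_py steps)

-- ===== LEMMAS AND PROOFS =====

-- invariant of A's classification loop: elements with global index < k1 go to band 0,
-- those with index in [k1, k2) to band 1, the rest to band 2
lemma fold_bands (n : Int) (k1 k2 : Nat) (hk : k1 ≤ k2)
    (hb0 : ∀ i : Nat, min (PySem.Int.floordiv ((i : Int) * 3) n) 2 = 0 ↔ i < k1)
    (hb1 : ∀ i : Nat, min (PySem.Int.floordiv ((i : Int) * 3) n) 2 = 1 ↔ (k1 ≤ i ∧ i < k2)) :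
    ∀ (xs : List Int) (s : Nat) (b0 b1 b2 : List Int),
      (PySem.List.enumerate xs (s : Int)).foldl (pvBandStep n) (b0, b1, b2)
        = (b0 ++ xs.take (k1 - s),
           b1 ++ (xs.drop (k1 - s)).take (k2 - max s k1),
           b2 ++ xs.drop (k2 - s)) := by
  intro xs
  induction xs with
  | nil => intro s b0 b1 b2; simp [PySem.List.enumerate_nil]
  | cons x xs ih =>
    intro s b0 b1 b2
    rw [PySem.List.enumerate_cons, List.foldl_cons]
    have hcast : ((s : Int) + 1) = ((s + 1 : Nat) : Int) := by push_cast; ring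
    by_cases h0 : s < k1
    · have hband := (hb0 s).mpr h0
      have hstep : pvBandStep n (b0, b1, b2) ((s : Int), x) = (b0 ++ [x], b1, b2) := by
        simp [pvBandStep, hband]
      rw [hstep, hcast, ih (s + 1) (b0 ++ [x]) b1 b2]
      have e1 : k1 - s = (k1 - (s + 1)) + 1 := by omega
      have e2 : k2 - s = (k2 - (s + 1)) + 1 := by omega
      have e3 : max s k1 = k1 := by omega
      have e4 : max (s + 1) k1 = k1 := by omega
      rw [e1, e2, e3, e4]
      simp
    · by_cases h1 : s < k2
      · have hband := (hb1 s).mpr ⟨by omega, h1⟩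
        have hstep : pvBandStep n (b0, b1, b2) ((s : Int), x) = (b0, b1 ++ [x], b2) := by
          simp [pvBandStep, hband]
        rw [hstep, hcast, ih (s + 1) b0 (b1 ++ [x]) b2]
        have e1 : k1 - s = 0 := by omega
        have e1' : k1 - (s + 1) = 0 := by omega
        have e2 : k2 - s = (k2 - (s + 1)) + 1 := by omega
        have e3 : max s k1 = s := by omega
        have e4 : max (s + 1) k1 = s + 1 := by omega
        rw [e1, e1', e3, e4]
        conv_rhs => rw [e2, List.drop_zero, List.take_succ_cons]
        simp
      · have hband0 : ¬ min (PySem.Int.floordiv ((s : Int) * 3) n) 2 = 0 := by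
          intro h; exact absurd ((hb0 s).mp h) h0
        have hband1 : ¬ min (PySem.Int.floordiv ((s : Int) * 3) n) 2 = 1 := by
          intro h; exact absurd ((hb1 s).mp h) (by omega)
        have hstep : pvBandStep n (b0, b1, b2) ((s : Int), x) = (b0, b1, b2 ++ [x]) := by
          simp [pvBandStep, hband0, hband1]
        rw [hstep, hcast, ih (s + 1) b0 b1 (b2 ++ [x])]
        have e1 : k1 - s = 0 := by omega
        have e1' : k1 - (s + 1) = 0 := by omega
        have e2 : k2 - s = 0 := by omega
        have e2' : k2 - (s + 1) = 0 := by omega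
        have e3 : max s k1 = s := by omega
        have e4 : max (s + 1) k1 = s + 1 := by omega
        have e5 : k2 - max s k1 = 0 := by omega
        have e6 : k2 - max (s + 1) k1 = 0 := by omega
        rw [e1, e1', e2, e2', e5, e6]
        simp

-- ===== VERDICT (by name: the statement is the Claim_ definition above) =====
theorem split_into_thirds_py_spec : Claim_equal_split_into_thirds_py := by
  intro steps _
  unfold Spec_split_into_thirds_py
  rcases steps with _ | ⟨y, ys⟩
  · rfl
  · have hL : 0 < (y :: ys).length := by simp
    set L := (y :: ys).length with hLdef
    have hpos : (0 : Int) < (L : Int) := by exact_mod_cast hL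
    have hb0 : ∀ i : Nat, min (PySem.Int.floordiv ((i : Int) * 3) (L : Int)) 2 = 0 ↔ i < (L + 2) / 3 := by
      intro i
      have hlb : (0 : Int) ≤ PySem.Int.floordiv ((i : Int) * 3) (L : Int) := by
        rw [PySem.Int.le_floordiv_iff_mul_le hpos]; simp
      have h1 : PySem.Int.floordiv ((i : Int) * 3) (L : Int) < 1 ↔ (i : Int) * 3 < 1 * (L : Int) :=
        PySem.Int.floordiv_lt_iff_lt_mul hpos
      omega
    have hb1 : ∀ i : Nat, min (PySem.Int.floordiv ((i : Int) * 3) (L : Int)) 2 = 1 ↔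
        ((L + 2) / 3 ≤ i ∧ i < (2 * L + 2) / 3) := by
      intro i
      have hlb : (0 : Int) ≤ PySem.Int.floordiv ((i : Int) * 3) (L : Int) := by
        rw [PySem.Int.le_floordiv_iff_mul_le hpos]; simp
      have h1 : PySem.Int.floordiv ((i : Int) * 3) (L : Int) < 1 ↔ (i : Int) * 3 < 1 * (L : Int) :=
        PySem.Int.floordiv_lt_iff_lt_mul hpos
      have h2 : PySem.Int.floordiv ((i : Int) * 3) (L : Int) < 2 ↔ (i : Int) * 3 < 2 * (L : Int) :=
        PySem.Int.floordiv_lt_iff_lt_mul hpos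
      omega
    have hne : ((L : Int)) ≠ 0 := by omega
    have hA : split_into_thirds_py (y :: ys)
        = [(y :: ys).take ((L + 2) / 3),
           ((y :: ys).drop ((L + 2) / 3)).take ((2 * L + 2) / 3 - (L + 2) / 3),
           (y :: ys).drop ((2 * L + 2) / 3)] := by
      have h := fold_bands (L : Int) ((L + 2) / 3) ((2 * L + 2) / 3) (by omega) hb0 hb1
        (y :: ys) 0 [] [] []
      simp only [Nat.cast_zero, Nat.sub_zero, Nat.zero_max, List.nil_append] at h
      simp only [split_into_thirds_py, ← hLdef]
      rw [if_neg hne, h]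
    have hk1 : PySem.Int.floordiv ((L : Int) + 2) 3 = (((L + 2) / 3 : Nat) : Int) := by
      rw [show ((L : Int) + 2) = (((L + 2 : Nat)) : Int) from by push_cast; ring]
      exact_mod_cast PySem.Int.floordiv_natCast (L + 2) 3
    have hk2 : PySem.Int.floordiv (2 * (L : Int) + 2) 3 = (((2 * L + 2) / 3 : Nat) : Int) := by
      rw [show (2 * (L : Int) + 2) = (((2 * L + 2 : Nat)) : Int) from by push_cast; ring]
      exact_mod_cast PySem.Int.floordiv_natCast (2 * L + 2) 3
    have hB : split_into_thirds_py_alt (y :: ys)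
        = [(y :: ys).take ((L + 2) / 3),
           ((y :: ys).drop ((L + 2) / 3)).take ((2 * L + 2) / 3 - (L + 2) / 3),
           (y :: ys).drop ((2 * L + 2) / 3)] := by
      simp only [split_into_thirds_py_alt, ← hLdef]
      rw [hk1, hk2,
          PySem.List.slice_to (y :: ys) (by positivity),
          PySem.List.slice_toNat (y :: ys) (by positivity) (by positivity),
          PySem.List.slice_from (y :: ys) (by positivity)]
      simp only [Int.toNat_natCast]
    rw [hA, hB]
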